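-- pv_equiv track=rewrite | github.com/ydb-platform/ydb | .github/scripts/github_issue_utils.py | resolve_team_by_longest_area_prefix
-- ===== SOURCE A (Python) =====
-- from typing import Dict, List, Optional, Tuple
--
-- def resolve_team_by_longest_area_prefix(normalized_area: str, area_to_owner: Dict[str, str]) -> Optional[str]:
--     """Longest mapping key where area equals key or starts with key + '/'."""
--     best = None
--     best_len = -1
--     for m_area, team in area_to_owner.items():
--         if not m_area:
--             continue
--         if normalized_area == m_area or normalized_area.startswith(m_area + "/"):
--             if len(m_area) > best_len:
--                 best = team
--                 best_len = len(m_area)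
--     return best
-- ===== SOURCE B (Python) =====
-- def resolve_team_by_longest_area_prefix(normalized_area: str, area_to_owner):
--     """Longest mapping key where area equals key or starts with key + '/'.
--
--     Instead of scanning every mapping entry, enumerate the area's own
--     '/'-boundary prefixes from longest to shortest and dict-look each up;
--     the first hit is the longest matching key.
--     """
--     if normalized_area and normalized_area in area_to_owner:
--         return area_to_owner[normalized_area]
--     for j in range(len(normalized_area) - 1, 0, -1):
--         if normalized_area[j] == "/":
--             key = normalized_area[:j]
--             if key in area_to_owner:
--                 return area_to_owner[key]
--     return None
-- ===== Notes on version B (the rewrite author's own statement) =====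
-- stated objective: alternative
-- what changed: Instead of scanning every mapping entry and testing it against the area, B enumerates the area's '/'-boundary prefixes from longest to shortest and dict-looks each one up, returning the first hit.
import Mathlib
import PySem

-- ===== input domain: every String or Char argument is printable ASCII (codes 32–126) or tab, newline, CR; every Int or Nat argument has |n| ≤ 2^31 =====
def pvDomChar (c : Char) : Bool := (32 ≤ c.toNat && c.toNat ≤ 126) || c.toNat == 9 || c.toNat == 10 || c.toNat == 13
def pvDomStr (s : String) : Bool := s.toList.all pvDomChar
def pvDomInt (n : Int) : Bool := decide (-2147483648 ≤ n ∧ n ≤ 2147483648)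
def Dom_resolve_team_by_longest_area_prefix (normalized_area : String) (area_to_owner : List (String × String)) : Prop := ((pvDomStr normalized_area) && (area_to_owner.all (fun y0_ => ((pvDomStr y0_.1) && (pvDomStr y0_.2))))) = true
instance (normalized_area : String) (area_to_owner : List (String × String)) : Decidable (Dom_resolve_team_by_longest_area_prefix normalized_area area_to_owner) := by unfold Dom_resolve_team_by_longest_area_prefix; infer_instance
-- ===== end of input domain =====

-- B replaces A's scan of every mapping entry by a longest-first walk over the
-- area's '/'-boundary prefixes with one dictionary lookup per prefix (alternative algorithm).


-- ===== PORT A =====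
-- literal transliteration of A: fold over the entries keeping (best, best_len)
def resolve_team_by_longest_area_prefix (normalized_area : String) (area_to_owner : List (String × String)) : Option String :=
  (area_to_owner.foldl
    (fun (acc : Option String × Int) p =>
      if p.1 == "" then acc
      else if normalized_area == p.1 || PySem.Str.startswith normalized_area (p.1 ++ "/") then
        (if PySem.Str.len p.1 > acc.2 then (some p.2, PySem.Str.len p.1) else acc)
      else acc)
    (none, -1)).1

-- ===== PORT B =====
-- first-match dict lookup: 'key in area_to_owner' / 'area_to_owner[key]'
def pvLookupB (area_to_owner : List (String × String)) (key : String) : Option String :=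
  (area_to_owner.find? (fun p => p.1 == key)).map (·.2)

-- 'for j in range(len(normalized_area)-1, 0, -1): …': n is the current j; positions
-- and slices are exact since 1 ≤ j < len (hand port of in-range s[j] / s[:j])
def pvLoopB (l : List Char) (area_to_owner : List (String × String)) : Nat → Option String
  | 0 => none
  | n+1 =>
    if l[n+1]? == some '/' then
      match pvLookupB area_to_owner (String.ofList (l.take (n+1))) with
      | some v => some v
      | none => pvLoopB l area_to_owner n
    else pvLoopB l area_to_owner n

def resolve_team_by_longest_area_prefix_alt (normalized_area : String) (area_to_owner : List (String × String)) : Option String :=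
  let l := normalized_area.toList
  match (if l.isEmpty then none else pvLookupB area_to_owner normalized_area) with
  | some v => some v
  | none => pvLoopB l area_to_owner (l.length - 1)

-- ===== PRECONDITION & SPEC =====
def Spec_resolve_team_by_longest_area_prefix (normalized_area : String) (area_to_owner : List (String × String)) (out : Option String) : Prop := out = resolve_team_by_longest_area_prefix_alt normalized_area area_to_owner
instance (normalized_area : String) (area_to_owner : List (String × String)) (out : Option String) : Decidable (Spec_resolve_team_by_longest_area_prefix normalized_area area_to_owner out) := by unfold Spec_resolve_team_by_longest_area_prefix; infer_instance

-- ===== CLAIM (what is proved, stated in full; the proofs are below) =====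
def Claim_equal_resolve_team_by_longest_area_prefix : Prop := ∀ (normalized_area : String) (area_to_owner : List (String × String)), Dom_resolve_team_by_longest_area_prefix normalized_area area_to_owner → Spec_resolve_team_by_longest_area_prefix normalized_area area_to_owner (resolve_team_by_longest_area_prefix normalized_area area_to_owner)

-- ===== LEMMAS AND PROOFS =====

-- helper definitions for the proofs
def pvLenI (k : String) : Int := (k.toList.length : Int)

def pvLenOf (e : Option (String × String)) : Int :=
  match e with | none => -1 | some q => pvLenI q.1

def pvAcc (na k : String) : Bool :=
  !(k == "") && ((na == k) || PySem.Str.startswith na (k ++ "/"))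

def pvStepK (na : String) (e : Option (String × String)) (p : String × String) :
    Option (String × String) :=
  if pvAcc na p.1 && decide (pvLenI p.1 > pvLenOf e) then some p else e

def pvOr {α : Type} (o e : Option α) : Option α :=
  match o with | some v => some v | none => e

def pvFindK (xs : List (String × String)) (c : String) : Option (String × String) :=
  xs.find? (fun p => p.1 == c)

def pvCandKeys (l : List Char) : Nat → List String
  | 0 => []
  | n+1 => (if l[n+1]? == some '/' then [String.ofList (l.take (n+1))] else []) ++ pvCandKeys l n

def pvCands (na : String) : List String :=
  (if na.toList.isEmpty then [] else [na]) ++ pvCandKeys na.toList (na.toList.length - 1)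

theorem pvOr_none {α : Type} (o : Option α) : pvOr o none = o := by cases o <;> rfl

theorem pvOr_assoc {α : Type} (a b c : Option α) : pvOr (pvOr a b) c = pvOr a (pvOr b c) := by
  cases a <;> rfl

theorem pvOr_map {α β : Type} (f : α → β) (a b : Option α) :
    (pvOr a b).map f = pvOr (a.map f) (b.map f) := by cases a <;> rfl

theorem pvFindSome_append {α β : Type} (as bs : List α) (f : α → Option β) :
    (as ++ bs).findSome? f = pvOr (as.findSome? f) (bs.findSome? f) := by
  induction as with
  | nil => simp [pvOr]
  | cons a as ih =>
    simp only [List.cons_append, List.findSome?_cons]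
    cases f a <;> simp [pvOr, ih]

theorem pvFindSome_congr {α β : Type} (cs : List α) (f g : α → Option β)
    (h : ∀ c ∈ cs, f c = g c) : cs.findSome? f = cs.findSome? g := by
  induction cs with
  | nil => rfl
  | cons c cs ih =>
    simp only [List.findSome?_cons, h c (by simp)]
    cases g c with
    | some v => rfl
    | none => exact ih (fun c hc => h c (by simp [hc]))

-- one entry of a findSome?: singleton list
theorem pvFindSome_singleton {α β : Type} (a : α) (f : α → Option β) :
    [a].findSome? f = f a := by
  simp only [List.findSome?_cons]; cases f a <;> rfl

-- splitting a strictly-decreasing candidate list around a member k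
theorem pvSplit (cs : List String) (k : String) (m : Int)
    (hs : cs.Pairwise (fun a b => pvLenI a > pvLenI b)) (hk : k ∈ cs) (hm : pvLenI k > m) :
    ∃ t, cs.filter (fun c => decide (pvLenI c > m)) =
      cs.filter (fun c => decide (pvLenI c > pvLenI k)) ++ k :: t := by
  induction cs with
  | nil => cases hk
  | cons c cs ih =>
    rcases List.pairwise_cons.mp hs with ⟨hc, hs'⟩
    rcases List.mem_cons.mp hk with rfl | hk'
    · refine ⟨cs.filter (fun c => decide (pvLenI c > m)), ?_⟩
      have h1 : (cs.filter (fun c => decide (pvLenI c > pvLenI k))) = [] :=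
        List.filter_eq_nil_iff.mpr (fun x hx => by simpa using not_lt.mpr (le_of_lt (hc x hx)))
      simp [hm, h1]
    · have hck : pvLenI c > pvLenI k := hc k hk'
      have hcm : pvLenI c > m := lt_trans hm hck
      rcases ih hs' hk' with ⟨t, ht⟩
      exact ⟨t, by simp [hcm, hck, ht]⟩

theorem pvFindK_cons_ne (x : String × String) (rest : List (String × String)) (c : String)
    (h : x.1 ≠ c) : pvFindK (x :: rest) c = pvFindK rest c := by
  simp [pvFindK, beq_eq_false_iff_ne.mpr h]

-- the main invariant: A's fold over the entries equals a longest-first search of the candidates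
theorem pvInv (na : String) (cs : List String)
    (hacc : ∀ c ∈ cs, pvAcc na c = true)
    (hcomp : ∀ k, pvAcc na k = true → k ∈ cs)
    (hs : cs.Pairwise (fun a b => pvLenI a > pvLenI b)) :
    ∀ (xs : List (String × String)) (e : Option (String × String)),
      xs.foldl (pvStepK na) e =
        pvOr ((cs.filter (fun c => decide (pvLenI c > pvLenOf e))).findSome? (pvFindK xs)) e := by
  intro xs
  induction xs with
  | nil =>
    intro e
    have : (cs.filter (fun c => decide (pvLenI c > pvLenOf e))).findSome? (pvFindK ([] : List (String × String))) = none := by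
      apply List.findSome?_eq_none_iff.mpr; intro c _; rfl
    simp [this, pvOr]
  | cons x rest ih =>
    intro e
    by_cases hx : pvAcc na x.1 = true ∧ pvLenI x.1 > pvLenOf e
    · -- x becomes the new best
      have hxc : x.1 ∈ cs := hcomp x.1 hx.1
      rcases pvSplit cs x.1 (pvLenOf e) hs hxc hx.2 with ⟨t, ht⟩
      have hstep : pvStepK na e x = some x := by
        simp [pvStepK, hx.1, hx.2]
      have hpre : ∀ c ∈ cs.filter (fun c => decide (pvLenI c > pvLenI x.1)),
          pvFindK (x :: rest) c = pvFindK rest c := by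
        intro c hcmem
        have hlen : pvLenI x.1 < pvLenI c := by
          have := (List.mem_filter.mp hcmem).2; simpa using this
        exact pvFindK_cons_ne x rest c (fun hEq => by rw [hEq] at hlen; exact lt_irrefl _ hlen)
      have hhead : pvFindK (x :: rest) x.1 = some x := by
        simp [pvFindK]
      calc (x :: rest).foldl (pvStepK na) e
          = rest.foldl (pvStepK na) (some x) := by rw [List.foldl_cons, hstep]
        _ = pvOr ((cs.filter (fun c => decide (pvLenI c > pvLenI x.1))).findSome? (pvFindK rest)) (some x) := by
              rw [ih (some x)]; rfl
        _ = pvOr ((cs.filter (fun c => decide (pvLenI c > pvLenOf e))).findSome? (pvFindK (x :: rest))) e := by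
              rw [ht, pvFindSome_append, List.findSome?_cons, hhead,
                  pvFindSome_congr _ _ _ hpre, pvOr_assoc]
              rfl
    · -- x does not change the accumulator
      have hstep : pvStepK na e x = e := by
        simp only [pvStepK]
        rcases Decidable.not_and_iff_not_or_not.mp hx with h | h
        · simp [h]
        · simp [h]
      have hne : ∀ c ∈ cs.filter (fun c => decide (pvLenI c > pvLenOf e)),
          pvFindK (x :: rest) c = pvFindK rest c := by
        intro c hcmem
        rcases List.mem_filter.mp hcmem with ⟨hcs, hclen⟩
        apply pvFindK_cons_ne
        intro hEq
        rcases Decidable.not_and_iff_not_or_not.mp hx with h | h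
        · exact h (hEq ▸ hacc c hcs)
        · exact h (by simpa [hEq] using of_decide_eq_true hclen)
      rw [List.foldl_cons, hstep, ih e, pvFindSome_congr _ _ _ hne]

-- A's fold with (Option String × Int) state projects from the key-tracking fold pvStepK
theorem pvProj (na : String) (xs : List (String × String)) :
    ∀ (e : Option (String × String)),
      xs.foldl
        (fun (acc : Option String × Int) p =>
          if p.1 == "" then acc
          else if na == p.1 || PySem.Str.startswith na (p.1 ++ "/") then
            (if PySem.Str.len p.1 > acc.2 then (some p.2, PySem.Str.len p.1) else acc)
          else acc)
        (e.map (·.2), pvLenOf e)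
      = ((xs.foldl (pvStepK na) e).map (·.2), pvLenOf (xs.foldl (pvStepK na) e)) := by
  induction xs with
  | nil => intro e; rfl
  | cons x rest ih =>
    intro e
    have hlen : PySem.Str.len x.1 = pvLenI x.1 := by simp [PySem.Str.len_eq, pvLenI]
    have hstep :
        (if x.1 == "" then (e.map (·.2), pvLenOf e)
         else if na == x.1 || PySem.Str.startswith na (x.1 ++ "/") then
           (if PySem.Str.len x.1 > (e.map (·.2), pvLenOf e).2 then (some x.2, PySem.Str.len x.1)
            else (e.map (·.2), pvLenOf e))
         else (e.map (·.2), pvLenOf e))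
        = ((pvStepK na e x).map (·.2), pvLenOf (pvStepK na e x)) := by
      have hA : pvAcc na x.1 = ((!(x.1 == "")) && (na == x.1 || PySem.Str.startswith na (x.1 ++ "/"))) := rfl
      by_cases h1 : (x.1 == "") = true
      · have hAf : pvAcc na x.1 = false := by rw [hA, h1]; rfl
        rw [if_pos h1]
        simp [pvStepK, hAf]
      · have h1' : (x.1 == "") = false := Bool.not_eq_true _ ▸ eq_false_of_ne_true h1
        rw [if_neg h1]
        by_cases h2 : (na == x.1 || PySem.Str.startswith na (x.1 ++ "/")) = true
        · rw [if_pos h2]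
          have hAt : pvAcc na x.1 = true := by rw [hA, h1', h2]; rfl
          by_cases h3 : PySem.Str.len x.1 > (Option.map (fun q => q.2) e, pvLenOf e).2
          · rw [if_pos h3]
            have h3' : decide (pvLenI x.1 > pvLenOf e) = true := by
              apply decide_eq_true; rw [← hlen]; exact h3
            have hsk : pvStepK na e x = some x := by
              unfold pvStepK; rw [hAt, h3']; rfl
            rw [hsk, hlen]; rfl
          · rw [if_neg h3]
            have h3' : decide (pvLenI x.1 > pvLenOf e) = false := by
              apply decide_eq_false; rw [← hlen]; exact h3
            have hsk : pvStepK na e x = e := by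
              unfold pvStepK; rw [hAt, h3']; rfl
            rw [hsk]
        · rw [if_neg h2]
          have hAf : pvAcc na x.1 = false := by rw [hA, eq_false_of_ne_true h2]; simp
          simp [pvStepK, hAf]
    rw [List.foldl_cons, List.foldl_cons, hstep, ih (pvStepK na e x)]

-- membership in the candidate-key list
theorem pvCandKeys_mem (l : List Char) (n : Nat) (c : String) :
    c ∈ pvCandKeys l n ↔ ∃ j, 1 ≤ j ∧ j ≤ n ∧ l[j]? = some '/' ∧ c = String.ofList (l.take j) := by
  induction n with
  | zero => simp [pvCandKeys]
  | succ n ih =>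
    simp only [pvCandKeys, List.mem_append, ih]
    constructor
    · rintro (hc | ⟨j, h1, h2, h3, h4⟩)
      · by_cases hsl : (l[n+1]? == some '/') = true
        · simp [hsl] at hc
          exact ⟨n+1, by omega, by omega, by simpa using hsl, hc⟩
        · simp [hsl] at hc
      · exact ⟨j, h1, by omega, h3, h4⟩
    · rintro ⟨j, h1, h2, h3, h4⟩
      by_cases hj : j = n + 1
      · subst hj; left; simp [h3, h4]
      · right; exact ⟨j, h1, by omega, h3, h4⟩

theorem pvStr_ne_nil {s : String} (h : s.toList ≠ []) : (s == "") = false := by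
  apply beq_eq_false_iff_ne.mpr
  intro hEq; subst hEq; exact h rfl

-- every candidate is accepted by A's test
theorem pvCands_acc (na : String) : ∀ c ∈ pvCands na, pvAcc na c = true := by
  intro c hc
  simp only [pvCands, List.mem_append] at hc
  rcases hc with hc | hc
  · by_cases he : na.toList.isEmpty
    · simp [he] at hc
    · simp [he] at hc
      have hnil : na.toList ≠ [] := by simpa [List.isEmpty_iff] using he
      rw [hc]
      unfold pvAcc
      rw [pvStr_ne_nil hnil]
      simp
  · rcases (pvCandKeys_mem _ _ _).mp hc with ⟨j, h1, h2, h3, rfl⟩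
    have hjlt : j < na.toList.length := (List.getElem?_eq_some_iff.mp h3).1
    have htake : (na.toList.take j).length = j := by rw [List.length_take]; omega
    have hnonnil : (String.ofList (na.toList.take j)).toList ≠ [] := by
      simp only [String.toList_ofList]
      intro hEq; rw [hEq] at htake; simp at htake; omega
    have hpre : (String.ofList (na.toList.take j) ++ "/").toList <+: na.toList := by
      have : na.toList.take j ++ ['/'] = na.toList.take (j+1) := by
        rw [List.take_add_one, h3]; rfl
      simp only [String.toList_append, String.toList_ofList]
      rw [show ("/" : String).toList = ['/'] from rfl, this]
      exact List.take_prefix _ _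
    have hsw : PySem.Str.startswith na (String.ofList (na.toList.take j) ++ "/") = true := by
      rw [PySem.Str.startswith_eq]
      exact (PySem.Chars.startswith_iff _ _).mpr hpre
    unfold pvAcc
    rw [pvStr_ne_nil hnonnil, hsw]
    simp

-- every accepted key is a candidate
theorem pvCands_complete (na : String) : ∀ k, pvAcc na k = true → k ∈ pvCands na := by
  intro k hk
  simp only [pvAcc, Bool.and_eq_true, Bool.not_eq_eq_eq_not, Bool.not_true,
    Bool.or_eq_true] at hk
  rcases hk with ⟨hne, hcase⟩
  have hknil : k.toList ≠ [] := by
    intro h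
    have : k = "" := String.toList_eq_nil_iff.mp h
    simp [this] at hne
  rcases hcase with heq | hsw
  · have : na = k := by simpa using heq
    subst this
    have : ¬ na.toList.isEmpty := by simpa [List.isEmpty_iff] using hknil
    simp [pvCands, this]
  · rw [PySem.Str.startswith_eq] at hsw
    have hpre := (PySem.Chars.startswith_iff _ _).mp hsw
    rw [String.toList_append, show ("/" : String).toList = ['/'] from rfl] at hpre
    rcases hpre with ⟨t, ht⟩
    set j := k.toList.length with hj
    have hl : na.toList = k.toList ++ '/' :: t := by
      rw [← ht]; simp
    have hget : na.toList[j]? = some '/' := by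
      rw [hl, List.getElem?_append_right (by omega)]
      simp [hj]
    have htake : na.toList.take j = k.toList := by
      rw [hl, List.take_append_of_le_length (by omega)]
      simp [hj]
    have hj1 : 1 ≤ j := by
      have := List.length_pos_of_ne_nil hknil
      omega
    have hlen2 : na.toList.length = j + (t.length + 1) := by
      rw [hl, List.length_append, List.length_cons]
    have hjn : j ≤ na.toList.length - 1 := by omega
    apply List.mem_append_right
    exact (pvCandKeys_mem _ _ _).mpr ⟨j, hj1, hjn, hget, by rw [htake, String.ofList_toList]⟩

theorem pvCandKeys_len_le (l : List Char) (n : Nat) :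
    ∀ c ∈ pvCandKeys l n, c.toList.length ≤ n := by
  intro c hc
  rcases (pvCandKeys_mem _ _ _).mp hc with ⟨j, _, h2, _, rfl⟩
  simp only [String.toList_ofList, List.length_take]
  omega

theorem pvCandKeys_sorted (l : List Char) (n : Nat) :
    (pvCandKeys l n).Pairwise (fun a b => pvLenI a > pvLenI b) := by
  induction n with
  | zero => simp [pvCandKeys]
  | succ n ih =>
    simp only [pvCandKeys]
    apply List.pairwise_append.mpr
    refine ⟨?_, ih, ?_⟩
    · split <;> simp
    · intro a ha b hb
      have hb' := pvCandKeys_len_le l n b hb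
      have ha' : a.toList.length = n + 1 := by
        by_cases h : (l[n+1]? == some '/') = true
        · simp only [h, if_true, List.mem_singleton] at ha
          subst ha
          have hlt : n + 1 < l.length := (List.getElem?_eq_some_iff.mp (by simpa using h)).1
          rw [String.toList_ofList, List.length_take]
          omega
        · simp [h] at ha
      have hlt : b.toList.length < a.toList.length := by omega
      simp only [pvLenI, gt_iff_lt]
      exact_mod_cast hlt
      
theorem pvCands_sorted (na : String) :
    (pvCands na).Pairwise (fun a b => pvLenI a > pvLenI b) := by
  simp only [pvCands]
  apply List.pairwise_append.mpr
  refine ⟨?_, pvCandKeys_sorted _ _, ?_⟩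
  · split <;> simp
  · intro a ha b hb
    by_cases he : na.toList.isEmpty
    · simp [he] at ha
    · simp [he] at ha
      have hnil : na.toList ≠ [] := by simpa [List.isEmpty_iff] using he
      have hlen : 1 ≤ na.toList.length := List.length_pos_of_ne_nil hnil
      have hble := pvCandKeys_len_le na.toList (na.toList.length - 1) b hb
      have hlt : b.toList.length < a.toList.length := by rw [ha]; omega
      simp only [pvLenI, gt_iff_lt]
      exact_mod_cast hlt

-- A computed as a longest-first candidate search
theorem pvA_eq (na : String) (xs : List (String × String)) :
    resolve_team_by_longest_area_prefix na xs =
      ((pvCands na).findSome? (pvFindK xs)).map (·.2) := by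
  have h0 : ((none : Option (String × String)).map (·.2), pvLenOf none) = ((none : Option String), (-1 : Int)) := rfl
  rw [resolve_team_by_longest_area_prefix, ← h0, pvProj na xs none]
  have hfilter : (pvCands na).filter (fun c => decide (pvLenI c > pvLenOf (none : Option (String × String)))) = pvCands na := by
    apply List.filter_eq_self.mpr
    intro c _
    simp only [pvLenOf, pvLenI, decide_eq_true_eq, gt_iff_lt]
    omega
  rw [pvInv na (pvCands na) (pvCands_acc na) (pvCands_complete na) (pvCands_sorted na) xs none,
      hfilter, pvOr_none]

-- B's inner loop searches exactly the candidate keys up to position n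
theorem pvLoopB_eq (l : List Char) (xs : List (String × String)) :
    ∀ n, pvLoopB l xs n = ((pvCandKeys l n).findSome? (pvFindK xs)).map (·.2) := by
  intro n
  induction n with
  | zero => rfl
  | succ n ih =>
    simp only [pvLoopB, pvCandKeys]
    by_cases h : (l[n+1]? == some '/') = true
    · rw [if_pos h, if_pos h]
      simp only [List.singleton_append, List.findSome?_cons]
      have : pvLookupB xs (String.ofList (l.take (n+1))) =
          (pvFindK xs (String.ofList (l.take (n+1)))).map (·.2) := rfl
      rw [this]
      cases pvFindK xs (String.ofList (l.take (n+1))) with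
      | some v => rfl
      | none => simpa using ih
    · rw [if_neg h, if_neg h]
      simpa using ih

-- B computed as the same longest-first candidate search
theorem pvB_eq (na : String) (xs : List (String × String)) :
    resolve_team_by_longest_area_prefix_alt na xs =
      ((pvCands na).findSome? (pvFindK xs)).map (·.2) := by
  rw [resolve_team_by_longest_area_prefix_alt, pvCands, pvFindSome_append, pvOr_map]
  by_cases he : na.toList.isEmpty
  · simp only [he, if_true]
    rw [pvLoopB_eq]
    rfl
  · simp only [he, if_neg, Bool.false_eq_true, not_false_eq_true]
    rw [pvFindSome_singleton]
    have : pvLookupB xs na = (pvFindK xs na).map (·.2) := rfl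
    rw [this, pvLoopB_eq]
    cases pvFindK xs na with
    | some v => rfl
    | none => rfl

-- ===== VERDICT (by name: the statement is the Claim_ definition above) =====
theorem resolve_team_by_longest_area_prefix_spec : Claim_equal_resolve_team_by_longest_area_prefix := by
  intro na xs _
  unfold Spec_resolve_team_by_longest_area_prefix
  rw [pvA_eq, pvB_eq]
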